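-- pv_equiv track=rewrite | github.com/pypi-data/pypi-mirror-402 | packages/synkit/synkit-1.1.1.tar.gz/synkit-1.1.1/synkit/CRN/Topo/automorphism.py | _compute_orbits_from_mappings
-- ===== SOURCE A (Python) =====
-- from typing import Any, Dict, Iterable, Iterator, List, Optional, Set, Tuple
-- from collections import defaultdict
--
-- def _compute_orbits_from_mappings(
--
--     nodes: List[Any],
--     mappings: Iterable[Dict[Any, Any]],
-- ) -> Tuple[List[Set[Any]], int]:
--     """
--     Group nodes into orbits using a stream of automorphism mappings.
--
--     :param nodes: List of nodes in the underlying graph.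
--     :type nodes: List[Any]
--     :param mappings: Iterable of automorphism mappings ``{node -> node}``.
--     :type mappings: Iterable[Dict[Any, Any]]
--     :returns: Tuple ``(orbits, used_count)`` where ``orbits`` is a list
--               of sets and ``used_count`` the number of mappings consumed.
--     :rtype: Tuple[List[Set[Any]], int]
--     """
--     parent: Dict[Any, Any] = {n: n for n in nodes}
--
--     def find(x: Any) -> Any:
--         while parent[x] != x:
--             parent[x] = parent[parent[x]]
--             x = parent[x]
--         return x
--
--     def union(x: Any, y: Any) -> None:
--         rx, ry = find(x), find(y)
--         if rx == ry:
--             return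
--         parent[ry] = rx
--
--     used = 0
--     for m in mappings:
--         used += 1
--         for src, dst in m.items():
--             union(src, dst)
--
--     buckets: Dict[Any, Set[Any]] = defaultdict(set)
--     for n in nodes:
--         r = find(n)
--         buckets[r].add(n)
--
--     return list(buckets.values()), used
-- ===== SOURCE B (Python) =====
-- def _compute_orbits_from_mappings(nodes, mappings):
--     """Group nodes into orbits by eager relabelling: keep a fully-materialised
--     representative map (no trees, no path compression) and, when a mapping pair
--     joins two classes, rewrite every member of the second class in one sweep."""
--     mappings = list(mappings)
--     rep = {n: n for n in nodes}
--     for m in mappings: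
--         for src, dst in m.items():
--             a, b = rep[src], rep[dst]
--             if a != b:
--                 for k in rep:
--                     if rep[k] == b:
--                         rep[k] = a
--     orbits = {}
--     for n in nodes:
--         orbits.setdefault(rep[n], set()).add(n)
--     return list(orbits.values()), len(mappings)
-- ===== Notes on version B (the rewrite author's own statement) =====
-- stated objective: alternative
-- what changed: Replaces the union-find forest (parent pointers, path-halving find, root buckets) by an eager-relabelling scheme: a flat node-to-representative map is kept fully materialised, each class-joining pair rewrites the losing class in one sweep, and orbits are grouped by the final representative.
import Mathlib
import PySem

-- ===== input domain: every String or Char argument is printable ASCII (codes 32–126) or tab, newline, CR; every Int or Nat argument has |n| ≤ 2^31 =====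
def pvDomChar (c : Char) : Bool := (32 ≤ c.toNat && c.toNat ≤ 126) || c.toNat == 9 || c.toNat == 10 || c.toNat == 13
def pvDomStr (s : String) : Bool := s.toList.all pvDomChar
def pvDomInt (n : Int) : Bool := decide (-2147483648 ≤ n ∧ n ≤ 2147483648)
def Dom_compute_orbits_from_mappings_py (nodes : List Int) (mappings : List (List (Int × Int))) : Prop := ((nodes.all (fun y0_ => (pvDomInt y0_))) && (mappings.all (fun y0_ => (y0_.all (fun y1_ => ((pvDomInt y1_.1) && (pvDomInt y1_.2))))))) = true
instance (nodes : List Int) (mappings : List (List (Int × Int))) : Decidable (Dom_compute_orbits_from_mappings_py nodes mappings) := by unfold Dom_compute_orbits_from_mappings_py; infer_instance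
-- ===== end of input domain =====

-- B replaces A's union-find forest (path-halving find + root buckets) by an eager-relabelling
-- representative map swept flat on every merge; same return value, no speed claim (objective: alternative).

-- ===== PORT A =====
-- parent[x]; on inputs admitted by Pre_ the lookup never misses, so the default is never consulted
def pvGetA (p : PySem.Dict Int Int) (x : Int) : Int := (p.get? x).getD x

-- `while parent[x] != x: parent[x] = parent[parent[x]]; x = parent[x]`.
-- Fueled structural recursion; fuel p.size + 1 always suffices for the states the
-- algorithm reaches (proved below), so fuel 0 is never hit on admitted inputs.
def pvFindA (fuel : Nat) (p : PySem.Dict Int Int) (x : Int) : Int × PySem.Dict Int Int :=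
  match fuel with
  | 0 => (x, p)
  | Nat.succ f =>
    if pvGetA p x = x then (x, p)
    else
      let ppx := pvGetA p (pvGetA p x)
      pvFindA f (p.insert x ppx) ppx

-- rx, ry = find(x), find(y); if rx == ry: return; parent[ry] = rx
def pvUnionA (p : PySem.Dict Int Int) (x y : Int) : PySem.Dict Int Int :=
  let fx := pvFindA (p.size + 1) p x
  let fy := pvFindA (fx.2.size + 1) fx.2 y
  if fx.1 = fy.1 then fy.2 else fy.2.insert fy.1 fx.1

def compute_orbits_from_mappings_py (nodes : List Int) (mappings : List (List (Int × Int))) : List (List Int) × Int :=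
  -- parent = {n: n for n in nodes}
  let parent0 := nodes.foldl (fun d n => d.insert n n) (PySem.Dict.empty : PySem.Dict Int Int)
  -- for m in mappings: used += 1; for src, dst in m.items(): union(src, dst)
  let st := mappings.foldl (fun (st : PySem.Dict Int Int × Int) m =>
      (m.foldl (fun p sd => pvUnionA p sd.1 sd.2) st.1, st.2 + 1)) (parent0, (0 : Int))
  -- buckets[find(n)].add(n)  (defaultdict(set): first access appends the key, add appends the element)
  let fin := nodes.foldl (fun (q : PySem.Dict Int Int × PySem.Dict Int (PySem.Set Int)) n =>
      let fr := pvFindA (q.1.size + 1) q.1 n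
      (fr.2, q.2.insert fr.1 (PySem.Set.add (q.2.getD fr.1 PySem.Set.empty) n))) (st.1, PySem.Dict.empty)
  (fin.2.values, st.2)

-- ===== PORT B =====
-- rep[x]; on inputs admitted by Pre_ the lookup never misses, so the default is never consulted
def pvGetB (r : PySem.Dict Int Int) (x : Int) : Int := (r.get? x).getD x

-- `for k in rep: if rep[k] == vb: rep[k] = va`  (value-only writes; the key list never changes)
def pvRelabelB (r : PySem.Dict Int Int) (va vb : Int) : PySem.Dict Int Int :=
  r.keys.foldl (fun acc k => if pvGetB acc k = vb then acc.insert k va else acc) r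

-- a, b = rep[src], rep[dst]; if a != b: relabel the whole b-class to a
def pvStepB (r : PySem.Dict Int Int) (sd : Int × Int) : PySem.Dict Int Int :=
  let a := pvGetB r sd.1
  let b := pvGetB r sd.2
  if a = b then r else pvRelabelB r a b

def compute_orbits_from_mappings_py_alt (nodes : List Int) (mappings : List (List (Int × Int))) : List (List Int) × Int :=
  -- rep = {n: n for n in nodes}
  let rep0 := nodes.foldl (fun d n => d.insert n n) (PySem.Dict.empty : PySem.Dict Int Int)
  let rep := mappings.foldl (fun r m => m.foldl pvStepB r) rep0
  -- orbits.setdefault(rep[n], set()).add(n) — setdefault-then-add is one overwrite-in-place insert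
  let orbits := nodes.foldl (fun (d : PySem.Dict Int (PySem.Set Int)) n =>
      d.insert (pvGetB rep n) (PySem.Set.add (d.getD (pvGetB rep n) PySem.Set.empty) n))
      (PySem.Dict.empty : PySem.Dict Int (PySem.Set Int))
  (orbits.values, (mappings.length : Int))

-- ===== PRECONDITION & SPEC =====
-- Pre_ excludes exactly the inputs on which A raises KeyError: some mapping endpoint not in nodes.
def Pre_compute_orbits_from_mappings_py (nodes : List Int) (mappings : List (List (Int × Int))) : Prop :=
  ∀ m ∈ mappings, ∀ sd ∈ m, sd.1 ∈ nodes ∧ sd.2 ∈ nodes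
instance (nodes : List Int) (mappings : List (List (Int × Int))) : Decidable (Pre_compute_orbits_from_mappings_py nodes mappings) := by unfold Pre_compute_orbits_from_mappings_py; infer_instance

def pvWitness_compute_orbits_from_mappings_py : List Int × (List (List (Int × Int))) := ([0, 1, 2], [[(0, 1)]])

def Spec_compute_orbits_from_mappings_py (nodes : List Int) (mappings : List (List (Int × Int))) (out : List (List Int) × Int) : Prop := out = compute_orbits_from_mappings_py_alt nodes mappings
instance (nodes : List Int) (mappings : List (List (Int × Int))) (out : List (List Int) × Int) : Decidable (Spec_compute_orbits_from_mappings_py nodes mappings out) := by unfold Spec_compute_orbits_from_mappings_py; infer_instance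

-- ===== CLAIM (what is proved, stated in full; the proofs are below) =====
def Claim_equal_compute_orbits_from_mappings_py : Prop := ∀ (nodes : List Int) (mappings : List (List (Int × Int))), Dom_compute_orbits_from_mappings_py nodes mappings → Pre_compute_orbits_from_mappings_py nodes mappings → Spec_compute_orbits_from_mappings_py nodes mappings (compute_orbits_from_mappings_py nodes mappings)

-- ===== LEMMAS AND PROOFS =====
-- proof-side machinery: the equivalence relation generated by the processed pairs
def pvRel (es : List (Int × Int)) : Int → Int → Prop := Relation.EqvGen (fun a b => (a, b) ∈ es)

theorem pvRel_refl (es : List (Int × Int)) (x : Int) : pvRel es x x := Relation.EqvGen.refl x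
theorem pvRel_symm {es : List (Int × Int)} {x y : Int} (h : pvRel es x y) : pvRel es y x := Relation.EqvGen.symm _ _ h
theorem pvRel_trans {es : List (Int × Int)} {x y z : Int} (h : pvRel es x y) (h' : pvRel es y z) : pvRel es x z := Relation.EqvGen.trans _ _ _ h h'
theorem pvRel_edge {es : List (Int × Int)} {a b : Int} (h : (a, b) ∈ es) : pvRel es a b := Relation.EqvGen.rel _ _ h

theorem pvRel_nil {x y : Int} (h : pvRel [] x y) : x = y := by
  induction h with
  | rel a b hab => simp at hab
  | refl => rfl
  | symm a b _ ih => exact ih.symm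
  | trans a b c _ _ ih1 ih2 => exact ih1.trans ih2

theorem pvRel_mono {es es' : List (Int × Int)} {x y : Int} (h : pvRel es x y) : pvRel (es ++ es') x y := by
  induction h with
  | rel a b hab => exact pvRel_edge (by simp [hab])
  | refl a => exact pvRel_refl _ a
  | symm a b _ ih => exact pvRel_symm ih
  | trans a b c _ _ ih1 ih2 => exact pvRel_trans ih1 ih2

theorem pvRel_snoc {es : List (Int × Int)} {a b x y : Int} :
    pvRel (es ++ [(a, b)]) x y ↔
      pvRel es x y ∨ (pvRel es x a ∧ pvRel es b y) ∨ (pvRel es x b ∧ pvRel es a y) := by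
  constructor
  · intro h
    induction h with
    | rel u v huv =>
      rcases (by simpa using huv : (u, v) ∈ es ∨ u = a ∧ v = b) with huv | huv
      · exact Or.inl (pvRel_edge huv)
      · exact Or.inr (Or.inl ⟨huv.1 ▸ pvRel_refl es u, huv.2 ▸ pvRel_refl es v⟩)
    | refl u => exact Or.inl (pvRel_refl _ u)
    | symm u v _ ih =>
      rcases ih with h1 | ⟨h1, h2⟩ | ⟨h1, h2⟩
      · exact Or.inl (pvRel_symm h1)
      · exact Or.inr (Or.inr ⟨pvRel_symm h2, pvRel_symm h1⟩)
      · exact Or.inr (Or.inl ⟨pvRel_symm h2, pvRel_symm h1⟩)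
    | trans u v w _ _ ih1 ih2 =>
      rcases ih1 with h1 | ⟨h1, h2⟩ | ⟨h1, h2⟩ <;>
        rcases ih2 with h3 | ⟨h3, h4⟩ | ⟨h3, h4⟩
      · exact Or.inl (pvRel_trans h1 h3)
      · exact Or.inr (Or.inl ⟨pvRel_trans h1 h3, h4⟩)
      · exact Or.inr (Or.inr ⟨pvRel_trans h1 h3, h4⟩)
      · exact Or.inr (Or.inl ⟨h1, pvRel_trans h2 h3⟩)
      · exact Or.inr (Or.inl ⟨h1, h4⟩)
      · exact Or.inl (pvRel_trans h1 h4)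
      · exact Or.inr (Or.inr ⟨h1, pvRel_trans h2 h3⟩)
      · exact Or.inl (pvRel_trans h1 h4)
      · exact Or.inr (Or.inr ⟨h1, h4⟩)
  · intro h
    rcases h with h | ⟨h1, h2⟩ | ⟨h1, h2⟩
    · exact pvRel_mono h
    · exact pvRel_trans (pvRel_mono h1) (pvRel_trans (pvRel_edge (by simp)) (pvRel_mono h2))
    · exact pvRel_trans (pvRel_mono h1) (pvRel_trans (pvRel_symm (pvRel_edge (by simp))) (pvRel_mono h2))
-- the root of x in the parent forest: iterate the parent map `size` times
def pvRoot (p : PySem.Dict Int Int) (x : Int) : Int := (pvGetA p)^[p.size] x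

-- the union-find invariant maintained by A's loop after processing the pairs `es`
def pvInvA (nodes : List Int) (es : List (Int × Int)) (p : PySem.Dict Int Int) : Prop :=
  p.keys.Nodup ∧
  (∀ x : Int, p.contains x = true ↔ x ∈ nodes) ∧
  (∀ x y : Int, p.get? x = some y → p.contains y = true ∧ pvRel es x y) ∧
  (∀ x : Int, ∃ n ≤ p.size, pvGetA p ((pvGetA p)^[n] x) = (pvGetA p)^[n] x) ∧
  (∀ x y : Int, p.contains x = true → p.contains y = true →
    pvGetA p x = x → pvGetA p y = y → pvRel es x y → x = y)

theorem pv_iter_stab {p : PySem.Dict Int Int} {x : Int} {n m : Nat}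
    (h : pvGetA p ((pvGetA p)^[n] x) = (pvGetA p)^[n] x) (hm : n ≤ m) :
    (pvGetA p)^[m] x = (pvGetA p)^[n] x := by
  obtain ⟨k, rfl⟩ := Nat.exists_eq_add_of_le hm
  rw [Nat.add_comm, Function.iterate_add_apply]
  exact Function.iterate_fixed h k

theorem pvRoot_eq_iter {p : PySem.Dict Int Int} {x : Int} {n : Nat}
    (h : pvGetA p ((pvGetA p)^[n] x) = (pvGetA p)^[n] x) (hn : n ≤ p.size) :
    pvRoot p x = (pvGetA p)^[n] x := pv_iter_stab h hn

theorem pvRoot_isRoot {nodes es} {p : PySem.Dict Int Int}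
    (hI : pvInvA nodes es p) (x : Int) : pvGetA p (pvRoot p x) = pvRoot p x := by
  obtain ⟨n, hn, hr⟩ := hI.2.2.2.1 x
  rw [pvRoot_eq_iter hr hn]; exact hr

theorem pv_nonroot_key {p : PySem.Dict Int Int} {x : Int} (h : pvGetA p x ≠ x) :
    p.contains x = true := by
  rw [PySem.Dict.contains_eq_isSome_get?]
  cases hx : p.get? x with
  | none => exact absurd (by simp [pvGetA, hx]) h
  | some v => rfl

theorem pv_iter_rel {nodes es} {p : PySem.Dict Int Int} (hI : pvInvA nodes es p)
    (x : Int) (n : Nat) : pvRel es x ((pvGetA p)^[n] x) := by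
  induction n with
  | zero => exact pvRel_refl _ _
  | succ k ih =>
    rw [Function.iterate_succ_apply']
    refine pvRel_trans ih ?_
    set z := (pvGetA p)^[k] x with hz
    cases hzz : p.get? z with
    | none => simp [pvGetA, hzz]; exact pvRel_refl _ _
    | some w =>
      have := (hI.2.2.1 z w hzz).2
      simpa [pvGetA, hzz] using this

theorem pvRoot_rel {nodes es} {p : PySem.Dict Int Int} (hI : pvInvA nodes es p)
    (x : Int) : pvRel es x (pvRoot p x) := pv_iter_rel hI x _

theorem pv_iter_contains {nodes es} {p : PySem.Dict Int Int} (hI : pvInvA nodes es p)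
    {x : Int} (hx : p.contains x = true) (n : Nat) : p.contains ((pvGetA p)^[n] x) = true := by
  induction n with
  | zero => exact hx
  | succ k ih =>
    rw [Function.iterate_succ_apply']
    set z := (pvGetA p)^[k] x
    cases hzz : p.get? z with
    | none => simpa [pvGetA, hzz] using ih
    | some w => simpa [pvGetA, hzz] using (hI.2.2.1 z w hzz).1

theorem pvRoot_contains {nodes es} {p : PySem.Dict Int Int} (hI : pvInvA nodes es p)
    {x : Int} (hx : p.contains x = true) : p.contains (pvRoot p x) = true :=
  pv_iter_contains hI hx _

theorem pvRoot_of_iter {nodes es} {p : PySem.Dict Int Int} (hI : pvInvA nodes es p)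
    (x : Int) (k : Nat) : pvRoot p ((pvGetA p)^[k] x) = pvRoot p x := by
  obtain ⟨n, hn, hr⟩ := hI.2.2.2.1 x
  show (pvGetA p)^[p.size] ((pvGetA p)^[k] x) = pvRoot p x
  rw [← Function.iterate_add_apply, pv_iter_stab hr (by omega), pvRoot_eq_iter hr hn]

theorem pvRoot_kernel {nodes es} {p : PySem.Dict Int Int} (hI : pvInvA nodes es p)
    {x y : Int} (hx : x ∈ nodes) (hy : y ∈ nodes) :
    (pvRoot p x = pvRoot p y ↔ pvRel es x y) := by
  constructor
  · intro h
    exact pvRel_trans (pvRoot_rel hI x) (h ▸ pvRel_symm (pvRoot_rel hI y))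
  · intro h
    refine hI.2.2.2.2 _ _ (pvRoot_contains hI ((hI.2.1 x).2 hx))
      (pvRoot_contains hI ((hI.2.1 y).2 hy)) (pvRoot_isRoot hI x) (pvRoot_isRoot hI y) ?_
    exact pvRel_trans (pvRel_symm (pvRoot_rel hI x)) (pvRel_trans h (pvRoot_rel hI y))

-- initial dict {n: n for n in nodes}
theorem pv_init_get? : ∀ (l : List Int) (d : PySem.Dict Int Int) (x : Int),
    (l.foldl (fun d n => d.insert n n) d).get? x = if x ∈ l then some x else d.get? x := by
  intro l
  induction l with
  | nil => simp
  | cons n t ih =>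
    intro d x
    simp only [List.foldl_cons, ih]
    by_cases hxt : x ∈ t
    · simp [hxt]
    · by_cases hxn : x = n
      · subst hxn; simp [hxt, PySem.Dict.get?_insert_self]
      · simp [hxt, hxn, PySem.Dict.get?_insert_of_ne _ _ hxn]

theorem pv_initA (nodes : List Int) :
    pvInvA nodes [] (nodes.foldl (fun d n => d.insert n n) PySem.Dict.empty) := by
  set p := nodes.foldl (fun d n => d.insert n n) (PySem.Dict.empty : PySem.Dict Int Int) with hp
  have hget : ∀ x : Int, p.get? x = if x ∈ nodes then some x else none := by
    intro x; rw [hp, pv_init_get?]; simp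
  have hcont : ∀ x : Int, p.contains x = true ↔ x ∈ nodes := by
    intro x
    rw [PySem.Dict.contains_eq_isSome_get?, hget]
    by_cases hx : x ∈ nodes <;> simp [hx]
  have hfix : ∀ x : Int, pvGetA p x = x := by
    intro x; rw [pvGetA, hget]; by_cases hx : x ∈ nodes <;> simp [hx]
  refine ⟨?_, hcont, ?_, ?_, ?_⟩
  · exact PySem.Dict.nodup_keys_foldl_insert nodes (fun _ x => x) _ (by simp)
  · intro x y hxy
    rw [hget] at hxy
    by_cases hx : x ∈ nodes
    · simp [hx] at hxy; subst hxy; exact ⟨(hcont x).2 hx, pvRel_refl _ _⟩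
    · simp [hx] at hxy
  · intro x; exact ⟨0, Nat.zero_le _, by simpa using hfix x⟩
  · intro x y _ _ _ _ h; exact pvRel_nil h
theorem pv_no_two_cycle {nodes es} {p : PySem.Dict Int Int} (hI : pvInvA nodes es p)
    {x : Int} (hx : pvGetA p x ≠ x) : pvGetA p (pvGetA p x) ≠ x := by
  intro hw
  have hpar : ∀ k : Nat, (pvGetA p)^[k] x = if k % 2 = 0 then x else pvGetA p x := by
    intro k
    induction k with
    | zero => simp
    | succ j ih =>
      rw [Function.iterate_succ_apply', ih]
      rcases Nat.even_or_odd j with hj | hj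
      · have h0 : j % 2 = 0 := Nat.even_iff.mp hj
        have h1 : (j + 1) % 2 = 1 := by omega
        simp [h0, h1]
      · have h0 : j % 2 = 1 := Nat.odd_iff.mp hj
        have h1 : (j + 1) % 2 = 0 := by omega
        simp [h0, h1, hw]
  obtain ⟨n, _, hr⟩ := hI.2.2.2.1 x
  rw [hpar n] at hr
  by_cases hn : n % 2 = 0
  · simp [hn] at hr; exact hx hr
  · simp [hn] at hr
    rw [hw] at hr
    exact hx hr.symm

theorem pv_shortcut {nodes es} {p : PySem.Dict Int Int} {x : Int}
    (hI : pvInvA nodes es p) (hx : pvGetA p x ≠ x) :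
    pvInvA nodes es (p.insert x (pvGetA p (pvGetA p x))) ∧
    (p.insert x (pvGetA p (pvGetA p x))).size = p.size ∧
    (∀ z, (p.insert x (pvGetA p (pvGetA p x))).contains z = p.contains z) ∧
    (∀ y, pvRoot (p.insert x (pvGetA p (pvGetA p x))) y = pvRoot p y) ∧
    (∀ y n, pvGetA p ((pvGetA p)^[n] y) = (pvGetA p)^[n] y →
      pvGetA (p.insert x (pvGetA p (pvGetA p x))) ((pvGetA (p.insert x (pvGetA p (pvGetA p x))))^[n] y)
        = (pvGetA (p.insert x (pvGetA p (pvGetA p x))))^[n] y ∧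
      (pvGetA (p.insert x (pvGetA p (pvGetA p x))))^[n] y = (pvGetA p)^[n] y) := by
  set w := pvGetA p (pvGetA p x) with hwdef
  set p' := p.insert x w with hp'
  have hw2 : w = (pvGetA p)^[2] x := by
    simp [hwdef, Function.iterate_succ_apply']
  have hcx : p.contains x = true := pv_nonroot_key hx
  have hS2 : ∀ z, pvGetA p' z = if z = x then w else pvGetA p z := by
    intro z
    simp only [pvGetA, hp', PySem.Dict.get?_insert]
    by_cases hzx : z = x <;> simp [hzx]
  have hwx : w ≠ x := pv_no_two_cycle hI hx
  have hS5 : ∀ z, (pvGetA p' z = z) ↔ (pvGetA p z = z) := by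
    intro z
    rw [hS2]
    by_cases hzx : z = x
    · subst hzx; simp [hwx, hx]
    · simp [hzx]
  have hS3 : ∀ (n : Nat) (y : Int), ∃ m, n ≤ m ∧ (pvGetA p')^[n] y = (pvGetA p)^[m] y := by
    intro n y
    induction n with
    | zero => exact ⟨0, le_refl _, rfl⟩
    | succ k ih =>
      obtain ⟨m, hm, hiter⟩ := ih
      rw [Function.iterate_succ_apply', hiter, hS2]
      by_cases hmx : (pvGetA p)^[m] y = x
      · refine ⟨m + 2, by omega, ?_⟩
        rw [if_pos hmx, hw2, ← hmx, ← Function.iterate_add_apply]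
        congr 1; omega
      · exact ⟨m + 1, by omega, by rw [if_neg hmx, Function.iterate_succ_apply']⟩
  have hwit : ∀ (y : Int) (n : Nat), pvGetA p ((pvGetA p)^[n] y) = (pvGetA p)^[n] y →
      pvGetA p' ((pvGetA p')^[n] y) = (pvGetA p')^[n] y ∧ (pvGetA p')^[n] y = (pvGetA p)^[n] y := by
    intro y n hr
    obtain ⟨m, hm, hiter⟩ := hS3 n y
    have : (pvGetA p)^[m] y = (pvGetA p)^[n] y := pv_iter_stab hr hm
    rw [hiter, this]
    exact ⟨(hS5 _).2 hr, rfl⟩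
  have hsize : p'.size = p.size := by rw [hp', PySem.Dict.size_insert, if_pos hcx]
  have hcont : ∀ z, p'.contains z = p.contains z := by
    intro z
    rw [hp', PySem.Dict.contains_insert]
    by_cases hzx : z = x
    · subst hzx; simp [hcx]
    · simp [hzx]
  have hroot : ∀ y, pvRoot p' y = pvRoot p y := by
    intro y
    obtain ⟨n, hn, hr⟩ := hI.2.2.2.1 y
    obtain ⟨hr', hiter⟩ := hwit y n hr
    have h1 : pvRoot p' y = (pvGetA p')^[n] y := by
      show (pvGetA p')^[p'.size] y = _
      rw [hsize]
      exact pv_iter_stab hr' hn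
    rw [h1, hiter, pvRoot_eq_iter hr hn]
  refine ⟨?_, hsize, hcont, hroot, hwit⟩
  obtain ⟨hN, hK, hV, hA, hR⟩ := hI
  refine ⟨PySem.Dict.nodup_keys_insert _ _ _ hN, fun z => by rw [hcont]; exact hK z, ?_, ?_, ?_⟩
  · intro z v hzv
    by_cases hzx : z = x
    · subst hzx
      rw [hp', PySem.Dict.get?_insert_self] at hzv
      have hv : v = w := (Option.some.inj hzv).symm
      subst hv
      constructor
      · rw [hcont, hw2]; exact pv_iter_contains ⟨hN, hK, hV, hA, hR⟩ hcx 2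
      · rw [hw2]; exact pv_iter_rel ⟨hN, hK, hV, hA, hR⟩ z 2
    · rw [hp', PySem.Dict.get?_insert_of_ne _ _ hzx] at hzv
      obtain ⟨h1, h2⟩ := hV z v hzv
      exact ⟨by rw [hcont]; exact h1, h2⟩
  · intro y
    obtain ⟨n, hn, hr⟩ := hA y
    exact ⟨n, by rw [hsize]; exact hn, (hwit y n hr).1⟩
  · intro u v hcu hcv hru hrv hrel
    rw [hcont] at hcu hcv
    rw [hS5] at hru hrv
    exact hR u v hcu hcv hru hrv hrel

theorem pvFindA_spec {nodes : List Int} {es : List (Int × Int)} :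
    ∀ (fuel : Nat) (p : PySem.Dict Int Int) (x : Int) (n : Nat), pvInvA nodes es p →
    pvGetA p ((pvGetA p)^[n] x) = (pvGetA p)^[n] x → n < fuel →
    (pvFindA fuel p x).1 = pvRoot p x ∧ pvInvA nodes es (pvFindA fuel p x).2 ∧
    (pvFindA fuel p x).2.size = p.size ∧
    (∀ y, (pvFindA fuel p x).2.contains y = p.contains y) ∧
    (∀ y, pvRoot (pvFindA fuel p x).2 y = pvRoot p y) := by
  intro fuel
  induction fuel with
  | zero => intro p x n _ _ h; omega
  | succ f ih =>
    intro p x n hI hr hn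
    by_cases hx : pvGetA p x = x
    · have : pvFindA (f + 1) p x = (x, p) := by simp [pvFindA, hx]
      rw [this]
      refine ⟨?_, hI, rfl, fun _ => rfl, fun _ => rfl⟩
      exact (pvRoot_eq_iter (n := 0) (by simpa using hx) (Nat.zero_le _)).symm
    · have hstep : pvFindA (f + 1) p x
          = pvFindA f (p.insert x (pvGetA p (pvGetA p x))) (pvGetA p (pvGetA p x)) := by
        simp [pvFindA, hx]
      obtain ⟨hI', hsize, hcont, hroot, hwit⟩ := pv_shortcut hI hx
      set w := pvGetA p (pvGetA p x) with hwdef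
      set p' := p.insert x w with hp'
      -- n ≥ 1, and w reaches its root in p within n - 1 steps
      have hn1 : 1 ≤ n := by
        rcases Nat.eq_zero_or_pos n with h0 | h1
        · subst h0; simp at hr; exact absurd hr hx
        · exact h1
      have hw2 : w = (pvGetA p)^[2] x := by simp [hwdef, Function.iterate_succ_apply']
      have hrw : pvGetA p ((pvGetA p)^[n - 1] w) = (pvGetA p)^[n - 1] w := by
        rw [hw2, ← Function.iterate_add_apply]
        have h2 : n - 1 + 2 = n + 1 := by omega
        rw [h2]
        have : (pvGetA p)^[n + 1] x = (pvGetA p)^[n] x := by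
          rw [Function.iterate_succ_apply', hr]
        rw [this]; exact hr
      obtain ⟨hrw', hiterw⟩ := hwit w (n - 1) hrw
      have hres := ih p' w (n - 1) hI' hrw' (by omega)
      rw [hstep]
      refine ⟨?_, hres.2.1, by rw [hres.2.2.1, hsize],
        fun y => by rw [hres.2.2.2.1 y, hcont y], fun y => by rw [hres.2.2.2.2 y, hroot y]⟩
      rw [hres.1, hroot w, hw2]
      exact pvRoot_of_iter hI x 2
theorem pv_keys_length (p : PySem.Dict Int Int) : p.keys.length = p.size := by
  simp [PySem.Dict.keys, PySem.Dict.size]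

theorem pv_inv_extend_of_rel {nodes : List Int} {es : List (Int × Int)}
    {p : PySem.Dict Int Int} {a b : Int} (hI : pvInvA nodes es p) (hab : pvRel es a b) :
    pvInvA nodes (es ++ [(a, b)]) p := by
  obtain ⟨hN, hK, hV, hA, hR⟩ := hI
  refine ⟨hN, hK, ?_, hA, ?_⟩
  · intro x y hxy
    obtain ⟨h1, h2⟩ := hV x y hxy
    exact ⟨h1, pvRel_mono h2⟩
  · intro u v hcu hcv hru hrv hrel
    rcases pvRel_snoc.1 hrel with h | ⟨h1, h2⟩ | ⟨h1, h2⟩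
    · exact hR u v hcu hcv hru hrv h
    · exact hR u v hcu hcv hru hrv (pvRel_trans h1 (pvRel_trans hab h2))
    · exact hR u v hcu hcv hru hrv (pvRel_trans h1 (pvRel_trans (pvRel_symm hab) h2))

theorem pv_link {nodes : List Int} {es : List (Int × Int)} {p : PySem.Dict Int Int}
    {a b : Int} (hI : pvInvA nodes es p) (ha : a ∈ nodes) (hb : b ∈ nodes)
    (hne : pvRoot p a ≠ pvRoot p b) :
    pvInvA nodes (es ++ [(a, b)]) (p.insert (pvRoot p b) (pvRoot p a)) := by
  set r1 := pvRoot p a with hr1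
  set r2 := pvRoot p b with hr2
  set p'' := p.insert r2 r1 with hp''
  have hroot1 : pvGetA p r1 = r1 := pvRoot_isRoot hI a
  have hroot2 : pvGetA p r2 = r2 := pvRoot_isRoot hI b
  have hc1 : p.contains r1 = true := pvRoot_contains hI ((hI.2.1 a).2 ha)
  have hc2 : p.contains r2 = true := pvRoot_contains hI ((hI.2.1 b).2 hb)
  have hF : ∀ z, pvGetA p'' z = if z = r2 then r1 else pvGetA p z := by
    intro z
    simp only [pvGetA, hp'', PySem.Dict.get?_insert]
    by_cases hz : z = r2 <;> simp [hz]
  have hsize : p''.size = p.size := by rw [hp'', PySem.Dict.size_insert, if_pos hc2]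
  have hcont : ∀ z, p''.contains z = p.contains z := by
    intro z
    rw [hp'', PySem.Dict.contains_insert]
    by_cases hz : z = r2
    · subst hz; simp [hc2]
    · simp [hz]
  have hrootPred : ∀ z, (pvGetA p'' z = z) ↔ (pvGetA p z = z ∧ z ≠ r2) := by
    intro z
    rw [hF]
    by_cases hz : z = r2
    · subst hz; simp [hne]
    · simp [hz]
  obtain ⟨hN, hK, hV, hA, hR⟩ := hI
  have hchain : ∀ (y : Int) (i : Nat), (∀ j < i, (pvGetA p)^[j] y ≠ r2) →
      (pvGetA p'')^[i] y = (pvGetA p)^[i] y := by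
    intro y i
    induction i with
    | zero => intro _; rfl
    | succ k ih =>
      intro hj
      rw [Function.iterate_succ_apply', Function.iterate_succ_apply',
        ih (fun j hjk => hj j (by omega)), hF, if_neg (hj k (by omega))]
  refine ⟨PySem.Dict.nodup_keys_insert _ _ _ hN, fun z => by rw [hcont]; exact hK z, ?_, ?_, ?_⟩
  · -- values stay keys and related
    intro z v hzv
    by_cases hz : z = r2
    · subst hz
      rw [hp'', PySem.Dict.get?_insert_self] at hzv
      have hv : v = r1 := (Option.some.inj hzv).symm
      subst hv
      refine ⟨by rw [hcont]; exact hc1, ?_⟩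
      refine pvRel_trans (pvRel_mono (es' := [(a, b)]) (pvRel_symm (pvRoot_rel ⟨hN, hK, hV, hA, hR⟩ b))) ?_
      refine pvRel_trans (pvRel_symm (pvRel_edge (a := a) (b := b) (by simp))) ?_
      exact pvRel_mono (pvRoot_rel ⟨hN, hK, hV, hA, hR⟩ a)
    · rw [hp'', PySem.Dict.get?_insert_of_ne _ _ hz] at hzv
      obtain ⟨h1, h2⟩ := hV z v hzv
      exact ⟨by rw [hcont]; exact h1, pvRel_mono h2⟩
  · -- every chain in p'' reaches a root within size steps
    intro y
    have hex : ∃ n, pvGetA p ((pvGetA p)^[n] y) = (pvGetA p)^[n] y := by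
      obtain ⟨n, _, hr⟩ := hA y; exact ⟨n, hr⟩
    set N := Nat.find hex with hNdef
    have hPN : pvGetA p ((pvGetA p)^[N] y) = (pvGetA p)^[N] y := Nat.find_spec hex
    have hNle : N ≤ p.size := by
      obtain ⟨n, hn, hr⟩ := hA y
      exact le_trans (Nat.find_min' hex hr) hn
    have hmin : ∀ j < N, pvGetA p ((pvGetA p)^[j] y) ≠ (pvGetA p)^[j] y :=
      fun j hj => Nat.find_min hex hj
    have hprefix_ne : ∀ j < N, (pvGetA p)^[j] y ≠ r2 := by
      intro j hj heq
      exact hmin j hj (by rw [heq]; exact hroot2)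
    by_cases hNr : (pvGetA p)^[N] y = r2
    · -- the chain ends at r2, which now points to r1
      have h1 : (pvGetA p'')^[N] y = (pvGetA p)^[N] y := hchain y N hprefix_ne
      have h2 : (pvGetA p'')^[N + 1] y = r1 := by
        rw [Function.iterate_succ_apply', h1, hNr, hF, if_pos rfl]
      refine ⟨N + 1, ?_, ?_⟩
      · show N + 1 ≤ p''.size
        -- pigeonhole: the N chain elements, r1 and r2 are distinct keys
        have hinj : ∀ i j, i < j → j < N → (pvGetA p)^[i] y ≠ (pvGetA p)^[j] y := by
          intro i j hij hjN heq
          have hper : ∀ t, (pvGetA p)^[i + t] y = (pvGetA p)^[j + t] y := by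
            intro t
            rw [Nat.add_comm i t, Nat.add_comm j t, Function.iterate_add_apply,
              Function.iterate_add_apply, heq]
          have hm : N - (j - i) < N := by omega
          refine hmin (N - (j - i)) hm ?_
          have : N - (j - i) = i + (N - j) := by omega
          rw [this, hper (N - j)]
          have : j + (N - j) = N := by omega
          rw [this]
          exact hPN
        have hnodup : ((List.range N).map (fun i => (pvGetA p)^[i] y) ++ [r1, r2]).Nodup := by
          refine List.Nodup.append ?_ ?_ ?_
          · refine List.Nodup.map_on ?_ (List.nodup_range)
            intro i hi j hj heq
            rcases lt_trichotomy i j with h | h | h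
            · exact absurd heq (hinj i j h (List.mem_range.mp hj))
            · exact h
            · exact absurd heq.symm (hinj j i h (List.mem_range.mp hi))
          · simp [hne]
          · intro z hz hz2
            simp only [List.mem_map, List.mem_range] at hz
            obtain ⟨i, hi, rfl⟩ := hz
            have hnr : pvGetA p ((pvGetA p)^[i] y) ≠ (pvGetA p)^[i] y := hmin i hi
            simp only [List.mem_cons] at hz2
            rcases hz2 with h | h | h
            · rw [h] at hnr; exact hnr hroot1
            · rw [h] at hnr; exact hnr hroot2
            · simp at h
        have hsub : ((List.range N).map (fun i => (pvGetA p)^[i] y) ++ [r1, r2]) ⊆ p.keys := by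
          intro z hz
          rcases List.mem_append.mp hz with hz | hz
          · simp only [List.mem_map, List.mem_range] at hz
            obtain ⟨i, hi, rfl⟩ := hz
            exact (PySem.Dict.contains_iff_mem_keys _ _).1 (pv_nonroot_key (hmin i hi))
          · simp only [List.mem_cons] at hz
            rcases hz with h | h | h
            · subst h; exact (PySem.Dict.contains_iff_mem_keys _ _).1 hc1
            · subst h; exact (PySem.Dict.contains_iff_mem_keys _ _).1 hc2
            · simp at h
          
        have hlen := (List.subperm_of_subset hnodup hsub).length_le
        rw [List.length_append, List.length_map, List.length_range, pv_keys_length] at hlen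
        have hlen2 : N + 2 ≤ p.size := by simpa using hlen
        rw [hsize]
        omega
      · show pvGetA p'' ((pvGetA p'')^[N + 1] y) = (pvGetA p'')^[N + 1] y
        rw [h2, hF, if_neg hne, hroot1]
    · -- the chain never meets r2, nothing changed along it
      have h1 : (pvGetA p'')^[N] y = (pvGetA p)^[N] y := by
        refine hchain y N ?_
        exact hprefix_ne
      refine ⟨N, by rw [hsize]; exact hNle, ?_⟩
      rw [h1, hF, if_neg hNr]
      exact hPN
  · -- distinct roots of p'' are unrelated under the extended relation
    intro u v hcu hcv hru hrv hrel
    rw [hcont] at hcu hcv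
    rw [hrootPred] at hru hrv
    rcases pvRel_snoc.1 hrel with h | ⟨h1, h2⟩ | ⟨h1, h2⟩
    · exact hR u v hcu hcv hru.1 hrv.1 h
    · exfalso
      refine hrv.2 (hR v r2 hcv hc2 hrv.1 hroot2 ?_)
      exact pvRel_trans (pvRel_symm h2) (pvRoot_rel ⟨hN, hK, hV, hA, hR⟩ b)
    · exfalso
      refine hru.2 (hR u r2 hcu hc2 hru.1 hroot2 ?_)
      exact pvRel_trans h1 (pvRoot_rel ⟨hN, hK, hV, hA, hR⟩ b)
theorem pvUnionA_spec {nodes : List Int} {es : List (Int × Int)} {p : PySem.Dict Int Int}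
    {a b : Int} (hI : pvInvA nodes es p) (ha : a ∈ nodes) (hb : b ∈ nodes) :
    pvInvA nodes (es ++ [(a, b)]) (pvUnionA p a b) ∧ (pvUnionA p a b).size = p.size := by
  obtain ⟨n1, hn1, hr1⟩ := hI.2.2.2.1 a
  have h1 := pvFindA_spec (p.size + 1) p a n1 hI hr1 (by omega)
  set fx := pvFindA (p.size + 1) p a with hfx
  obtain ⟨hfx1, hIx, hsx, hcx, hrx⟩ := h1
  obtain ⟨n2, hn2, hr2⟩ := hIx.2.2.2.1 b
  have h2 := pvFindA_spec (fx.2.size + 1) fx.2 b n2 hIx hr2 (by omega)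
  set fy := pvFindA (fx.2.size + 1) fx.2 b with hfy
  obtain ⟨hfy1, hIy, hsy, hcy, hry⟩ := h2
  have hroota : fx.1 = pvRoot fy.2 a := by rw [hfx1, ← hrx a, ← hry a]
  have hrootb : fy.1 = pvRoot fy.2 b := by rw [hfy1, ← hry b]
  have hsz : fy.2.size = p.size := by rw [hsy, hsx]
  by_cases heq : fx.1 = fy.1
  · have hrel : pvRel es a b := by
      refine (pvRoot_kernel hIy ha hb).1 ?_
      rw [← hroota, ← hrootb, heq]
    have : pvUnionA p a b = fy.2 := by
      rw [pvUnionA, ← hfx, ← hfy, if_pos heq]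
    rw [this]
    exact ⟨pv_inv_extend_of_rel hIy hrel, hsz⟩
  · have hne : pvRoot fy.2 a ≠ pvRoot fy.2 b := by
      rw [← hroota, ← hrootb]; exact heq
    have : pvUnionA p a b = fy.2.insert fy.1 fx.1 := by
      rw [pvUnionA, ← hfx, ← hfy, if_neg heq]
    rw [this, hroota, hrootb]
    refine ⟨pv_link hIy ha hb hne, ?_⟩
    rw [PySem.Dict.size_insert, if_pos, hsz]
    exact pvRoot_contains hIy ((hIy.2.1 b).2 hb)

theorem pv_loopA_inner {nodes : List Int} :
    ∀ (m : List (Int × Int)) (es : List (Int × Int)) (p : PySem.Dict Int Int),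
    pvInvA nodes es p → (∀ sd ∈ m, sd.1 ∈ nodes ∧ sd.2 ∈ nodes) →
    pvInvA nodes (es ++ m) (m.foldl (fun p sd => pvUnionA p sd.1 sd.2) p) := by
  intro m
  induction m with
  | nil => intro es p hI _; simpa using hI
  | cons sd t ih =>
    intro es p hI hm
    have h1 := pvUnionA_spec hI (hm sd (by simp)).1 (hm sd (by simp)).2
    have h2 := ih (es ++ [(sd.1, sd.2)]) _ h1.1 (fun x hx => hm x (by simp [hx]))
    simp only [List.foldl_cons]
    have : es ++ sd :: t = (es ++ [(sd.1, sd.2)]) ++ t := by simp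
    rw [this]
    exact h2

theorem pv_loopA {nodes : List Int} :
    ∀ (ms : List (List (Int × Int))) (es : List (Int × Int)) (p : PySem.Dict Int Int),
    pvInvA nodes es p → (∀ m ∈ ms, ∀ sd ∈ m, sd.1 ∈ nodes ∧ sd.2 ∈ nodes) →
    pvInvA nodes (es ++ ms.flatten)
      (ms.foldl (fun p m => m.foldl (fun p sd => pvUnionA p sd.1 sd.2) p) p) := by
  intro ms
  induction ms with
  | nil => intro es p hI _; simpa using hI
  | cons m t ih =>
    intro es p hI hms
    have h1 := pv_loopA_inner m es p hI (hms m (by simp))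
    have h2 := ih (es ++ m) _ h1 (fun m' hm' => hms m' (by simp [hm']))
    simp only [List.foldl_cons, List.flatten_cons]
    have : es ++ (m ++ t.flatten) = (es ++ m) ++ t.flatten := by simp
    rw [this]
    exact h2
-- the shared shape of both final grouping loops
def pvFoldB (f : Int → Int) (ns : List Int) (d : PySem.Dict Int (PySem.Set Int)) :
    PySem.Dict Int (PySem.Set Int) :=
  ns.foldl (fun d n => d.insert (f n) (PySem.Set.add (d.getD (f n) PySem.Set.empty) n)) d

theorem pv_bucketA {nodes : List Int} {es : List (Int × Int)} (pstar : PySem.Dict Int Int) :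
    ∀ (ns : List Int) (p : PySem.Dict Int Int) (d : PySem.Dict Int (PySem.Set Int)),
    pvInvA nodes es p → (∀ y, pvRoot p y = pvRoot pstar y) →
    (ns.foldl (fun (q : PySem.Dict Int Int × PySem.Dict Int (PySem.Set Int)) n =>
      let fr := pvFindA (q.1.size + 1) q.1 n
      (fr.2, q.2.insert fr.1 (PySem.Set.add (q.2.getD fr.1 PySem.Set.empty) n))) (p, d)).2
      = pvFoldB (fun y => pvRoot pstar y) ns d := by
  intro ns
  induction ns with
  | nil => intro p d _ _; rfl
  | cons n t ih =>
    intro p d hI hroots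
    obtain ⟨k, hk, hr⟩ := hI.2.2.2.1 n
    obtain ⟨hf1, hfI, hfs, hfc, hfr⟩ := pvFindA_spec (p.size + 1) p n k hI hr (by omega)
    simp only [List.foldl_cons, pvFoldB]
    rw [show (pvFindA (p.size + 1) p n).1 = pvRoot pstar n from by rw [hf1, hroots n]]
    exact ih _ _ hfI (fun y => by rw [hfr y, hroots y])
-- B's invariant: rep is a total relabelling whose kernel on nodes is exactly pvRel es
def pvInvB (nodes : List Int) (es : List (Int × Int)) (r : PySem.Dict Int Int) : Prop :=
  r.keys.Nodup ∧
  (∀ x : Int, r.contains x = true ↔ x ∈ nodes) ∧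
  (∀ x y : Int, r.get? x = some y → r.contains y = true) ∧
  (∀ x y : Int, x ∈ nodes → y ∈ nodes → (pvGetB r x = pvGetB r y ↔ pvRel es x y))

theorem pv_relabel_get? (va vb : Int) :
    ∀ (ks : List Int) (acc : PySem.Dict Int Int), ks.Nodup →
    (∀ k ∈ ks, (acc.get? k).isSome = true) → ∀ x : Int,
    (ks.foldl (fun acc k => if pvGetB acc k = vb then acc.insert k va else acc) acc).get? x
      = if x ∈ ks then (acc.get? x).map (fun v => if v = vb then va else v) else acc.get? x := by
  intro ks
  induction ks with
  | nil => intro acc _ _ x; simp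
  | cons k t ih =>
    intro acc hnd hsome x
    obtain ⟨hkt, hndt⟩ := List.nodup_cons.mp hnd
    obtain ⟨v, hv⟩ := Option.isSome_iff_exists.mp (hsome k (by simp))
    set acc' := if pvGetB acc k = vb then acc.insert k va else acc with hacc'
    have hget' : ∀ z, z ≠ k → acc'.get? z = acc.get? z := by
      intro z hz
      rw [hacc']
      split
      · exact PySem.Dict.get?_insert_of_ne _ _ hz
      · rfl
    have hgetk : acc'.get? k = (acc.get? k).map (fun v => if v = vb then va else v) := by
      rw [hacc', hv]
      have hgb : pvGetB acc k = v := by simp [pvGetB, hv]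
      by_cases hvb : v = vb
      · rw [if_pos (by rw [hgb, hvb]), PySem.Dict.get?_insert_self]
        simp [hvb]
      · rw [if_neg (by rw [hgb]; exact hvb), hv]
        simp [hvb]
    have hsome' : ∀ k' ∈ t, (acc'.get? k').isSome = true := by
      intro k' hk'
      rw [hget' k' (fun h => hkt (h ▸ hk'))]
      exact hsome k' (by simp [hk'])
    simp only [List.foldl_cons, ← hacc']
    rw [ih acc' hndt hsome' x]
    by_cases hxt : x ∈ t
    · simp only [if_pos hxt, if_pos (List.mem_cons.mpr (Or.inr hxt))]
      rw [hget' x (fun h => hkt (h ▸ hxt))]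
    · by_cases hxk : x = k
      · subst hxk
        simp only [if_neg hxt, if_pos (List.mem_cons_self ..)]
        exact hgetk
      · have hnx : ¬ x ∈ k :: t := by
          intro h
          rcases List.mem_cons.mp h with h' | h'
          · exact hxk h'
          · exact hxt h'
        simp only [if_neg hxt, if_neg hnx]
        exact hget' x hxk

theorem pv_relabel_keys (va vb : Int) :
    ∀ (ks : List Int) (acc : PySem.Dict Int Int), (∀ k ∈ ks, acc.contains k = true) →
    (ks.foldl (fun acc k => if pvGetB acc k = vb then acc.insert k va else acc) acc).keys = acc.keys := by
  intro ks
  induction ks with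
  | nil => intro acc _; rfl
  | cons k0 t ih =>
    intro acc hc
    simp only [List.foldl_cons]
    set acc' := if pvGetB acc k0 = vb then acc.insert k0 va else acc with hacc'
    have hck : ∀ z, acc'.contains z = acc.contains z := by
      intro z
      rw [hacc']
      split
      · rw [PySem.Dict.contains_insert]
        by_cases hz : z = k0
        · subst hz; simp [hc z (by simp)]
        · simp [hz]
      · rfl
    have hk' : acc'.keys = acc.keys := by
      rw [hacc']
      split
      · exact PySem.Dict.keys_insert_of_contains _ _ (hc k0 (by simp))
      · rfl
    rw [ih acc' (fun z hz => by rw [hck]; exact hc z (by simp [hz])), hk']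

theorem pvStepB_spec {nodes : List Int} {es : List (Int × Int)} {r : PySem.Dict Int Int}
    {sd : Int × Int} (hI : pvInvB nodes es r) (ha : sd.1 ∈ nodes) (hb : sd.2 ∈ nodes) :
    pvInvB nodes (es ++ [sd]) (pvStepB r sd) := by
  obtain ⟨hN, hK, hV, hker⟩ := hI
  obtain ⟨a, b⟩ := sd
  simp only at ha hb
  set va := pvGetB r a with hva
  set vb := pvGetB r b with hvb
  by_cases hab : va = vb
  · have hstep : pvStepB r (a, b) = r := by
      simp [pvStepB, ← hva, ← hvb, hab]
    rw [hstep]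
    have hrel : pvRel es a b := (hker a b ha hb).1 hab
    refine ⟨hN, hK, hV, ?_⟩
    intro x y hx hy
    rw [hker x y hx hy]
    rw [pvRel_snoc]
    constructor
    · exact Or.inl
    · rintro (h | ⟨h1, h2⟩ | ⟨h1, h2⟩)
      · exact h
      · exact pvRel_trans h1 (pvRel_trans hrel h2)
      · exact pvRel_trans h1 (pvRel_trans (pvRel_symm hrel) h2)
  · have hstep : pvStepB r (a, b) = pvRelabelB r va vb := by
      simp only [pvStepB, ← hva, ← hvb]
      rw [if_neg hab]
    have hsome : ∀ k ∈ r.keys, (r.get? k).isSome = true := by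
      intro k hk
      rw [← PySem.Dict.contains_eq_isSome_get?]
      exact (PySem.Dict.contains_iff_mem_keys _ _).2 hk
    have hget : ∀ x : Int, (pvRelabelB r va vb).get? x
        = if x ∈ r.keys then (r.get? x).map (fun v => if v = vb then va else v) else r.get? x := by
      intro x
      exact pv_relabel_get? va vb r.keys r hN hsome x
    have hcont : ∀ x, (pvRelabelB r va vb).contains x = r.contains x := by
      intro x
      rw [PySem.Dict.contains_eq_isSome_get?, PySem.Dict.contains_eq_isSome_get?, hget]
      by_cases hx : x ∈ r.keys
      · simp [hx]
      · simp [hx]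
    have hkeys : (pvRelabelB r va vb).keys = r.keys := by
      rw [pvRelabelB]
      exact pv_relabel_keys va vb r.keys r (fun k hk => (PySem.Dict.contains_iff_mem_keys _ _).2 hk)
    have hGB : ∀ x : Int, x ∈ nodes →
        pvGetB (pvRelabelB r va vb) x = (fun v => if v = vb then va else v) (pvGetB r x) := by
      intro x hx
      have hcx : r.contains x = true := (hK x).2 hx
      have hsx : (r.get? x).isSome = true := by rw [← PySem.Dict.contains_eq_isSome_get?]; exact hcx
      obtain ⟨v, hv⟩ := Option.isSome_iff_exists.mp hsx
      have hxk : x ∈ r.keys := (PySem.Dict.contains_iff_mem_keys _ _).1 hcx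
      simp [pvGetB, hget x, hxk, hv]
    have hGa : ∀ x : Int, x ∈ nodes → (pvGetB r x = va ↔ pvRel es x a) := by
      intro x hx; rw [hva]; exact hker x a hx ha
    have hGb : ∀ x : Int, x ∈ nodes → (pvGetB r x = vb ↔ pvRel es x b) := by
      intro x hx; rw [hvb]; exact hker x b hx hb
    rw [hstep]
    refine ⟨by rw [hkeys]; exact hN, fun x => by rw [hcont]; exact hK x, ?_, ?_⟩
    · intro x y hxy
      rw [hget x] at hxy
      by_cases hxk : x ∈ r.keys
      · rw [if_pos hxk] at hxy
        obtain ⟨v, hv, hvy⟩ := Option.map_eq_some_iff.mp hxy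
        have hcv := hV x v hv
        rw [hcont]
        by_cases hvvb : v = vb
        · rw [← hvy]
          simp only [if_pos hvvb]
          have hca : r.contains a = true := (hK a).2 ha
          have hsa : (r.get? a).isSome = true := by rw [← PySem.Dict.contains_eq_isSome_get?]; exact hca
          obtain ⟨w, hw⟩ := Option.isSome_iff_exists.mp hsa
          have : va = w := by rw [hva]; simp [pvGetB, hw]
          rw [this]
          exact hV a w hw
        · rw [← hvy]; simp only [if_neg hvvb]; exact hcv
      · rw [if_neg hxk] at hxy
        rw [hcont]
        exact hV x y hxy
    · intro x y hx hy
      rw [hGB x hx, hGB y hy]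
      simp only []
      have hcollapse : ((if pvGetB r x = vb then va else pvGetB r x)
          = (if pvGetB r y = vb then va else pvGetB r y))
          ↔ (pvGetB r x = pvGetB r y ∨ (pvGetB r x = va ∧ pvGetB r y = vb)
              ∨ (pvGetB r x = vb ∧ pvGetB r y = va)) := by
        by_cases h1 : pvGetB r x = vb <;> by_cases h2 : pvGetB r y = vb
        · simp [h1, h2]
        · simp only [if_pos h1, if_neg h2]
          constructor
          · intro h; exact Or.inr (Or.inr ⟨h1, h.symm⟩)
          · rintro (h | ⟨h3, h4⟩ | ⟨h3, h4⟩)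
            · exact absurd (h ▸ h1) h2
            · exact absurd h4 h2
            · exact h4.symm
        · simp only [if_neg h1, if_pos h2]
          constructor
          · intro h; exact Or.inr (Or.inl ⟨h, h2⟩)
          · rintro (h | ⟨h3, h4⟩ | ⟨h3, h4⟩)
            · exact absurd (h.symm ▸ h2) h1
            · exact h3
            · exact absurd h3 h1
        · simp only [if_neg h1, if_neg h2]
          constructor
          · exact Or.inl
          · rintro (h | ⟨h3, h4⟩ | ⟨h3, h4⟩)
            · exact h
            · exact absurd h4 h2
            · exact absurd h3 h1
      rw [hcollapse, pvRel_snoc]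
      constructor
      · rintro (h | ⟨h3, h4⟩ | ⟨h3, h4⟩)
        · exact Or.inl ((hker x y hx hy).1 h)
        · exact Or.inr (Or.inl ⟨(hGa x hx).1 h3, pvRel_symm ((hGb y hy).1 h4)⟩)
        · exact Or.inr (Or.inr ⟨(hGb x hx).1 h3, pvRel_symm ((hGa y hy).1 h4)⟩)
      · rintro (h | ⟨h3, h4⟩ | ⟨h3, h4⟩)
        · exact Or.inl ((hker x y hx hy).2 h)
        · exact Or.inr (Or.inl ⟨(hGa x hx).2 h3, (hGb y hy).2 (pvRel_symm h4)⟩)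
        · exact Or.inr (Or.inr ⟨(hGb x hx).2 h3, (hGa y hy).2 (pvRel_symm h4)⟩)
theorem pv_initB (nodes : List Int) :
    pvInvB nodes [] (nodes.foldl (fun d n => d.insert n n) PySem.Dict.empty) := by
  have hI := pv_initA nodes
  obtain ⟨hN, hK, hV, _, _⟩ := hI
  refine ⟨hN, hK, fun x y hxy => (hV x y hxy).1, ?_⟩
  intro x y hx hy
  set p := nodes.foldl (fun d n => d.insert n n) (PySem.Dict.empty : PySem.Dict Int Int)
  have hget : ∀ z : Int, p.get? z = if z ∈ nodes then some z else none := by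
    intro z; rw [pv_init_get?]; simp
  have hfix : ∀ z : Int, pvGetB p z = z := by
    intro z; rw [pvGetB, hget]; by_cases hz : z ∈ nodes <;> simp [hz]
  rw [hfix, hfix]
  constructor
  · intro h; subst h; exact pvRel_refl _ _
  · exact pvRel_nil

theorem pv_loopB_inner {nodes : List Int} :
    ∀ (m : List (Int × Int)) (es : List (Int × Int)) (r : PySem.Dict Int Int),
    pvInvB nodes es r → (∀ sd ∈ m, sd.1 ∈ nodes ∧ sd.2 ∈ nodes) →
    pvInvB nodes (es ++ m) (m.foldl pvStepB r) := by
  intro m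
  induction m with
  | nil => intro es r hI _; simpa using hI
  | cons sd t ih =>
    intro es r hI hm
    have h1 := pvStepB_spec hI (hm sd (by simp)).1 (hm sd (by simp)).2
    have h2 := ih (es ++ [sd]) _ h1 (fun x hx => hm x (by simp [hx]))
    simp only [List.foldl_cons]
    have : es ++ sd :: t = (es ++ [sd]) ++ t := by simp
    rw [this]
    exact h2

theorem pv_loopB {nodes : List Int} :
    ∀ (ms : List (List (Int × Int))) (es : List (Int × Int)) (r : PySem.Dict Int Int),
    pvInvB nodes es r → (∀ m ∈ ms, ∀ sd ∈ m, sd.1 ∈ nodes ∧ sd.2 ∈ nodes) →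
    pvInvB nodes (es ++ ms.flatten) (ms.foldl (fun r m => m.foldl pvStepB r) r) := by
  intro ms
  induction ms with
  | nil => intro es r hI _; simpa using hI
  | cons m t ih =>
    intro es r hI hms
    have h1 := pv_loopB_inner m es r hI (hms m (by simp))
    have h2 := ih (es ++ m) _ h1 (fun m' hm' => hms m' (by simp [hm']))
    simp only [List.foldl_cons, List.flatten_cons]
    have : es ++ (m ++ t.flatten) = (es ++ m) ++ t.flatten := by simp
    rw [this]
    exact h2
theorem pv_lookup_congr (f g : Int → Int) (n : Int) :
    ∀ (l1 l2 : List (Int × PySem.Set Int)),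
    List.Forall₂ (fun p q => p.2 = q.2 ∧ (f n = p.1 ↔ g n = q.1)) l1 l2 →
    (PySem.Dict.mk l1).get? (f n) = (PySem.Dict.mk l2).get? (g n) := by
  intro l1 l2 hF
  induction hF with
  | nil => rfl
  | cons hpq _ ih =>
    rename_i p q l1' l2' _
    obtain ⟨hv, hk⟩ := hpq
    rw [PySem.Dict.get?_mk_cons, PySem.Dict.get?_mk_cons]
    by_cases hfp : f n = p.1
    · have hgq : g n = q.1 := hk.1 hfp
      rw [if_pos (by simp [hfp.symm]), if_pos (by simp [hgq.symm]), hv]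
    · have hgq : ¬ g n = q.1 := fun h => hfp (hk.2 h)
      rw [if_neg (by simp; exact fun h => hfp h.symm),
        if_neg (by simp; exact fun h => hgq h.symm)]
      exact ih

theorem pv_snd_congr {γ : Type} : ∀ (l1 l2 : List (Int × γ)),
    List.Forall₂ (fun (p q : Int × γ) => p.2 = q.2) l1 l2 →
    l1.map Prod.snd = l2.map Prod.snd := by
  intro l1 l2 hF
  induction hF with
  | nil => rfl
  | cons hpq _ ih => simp only [List.map_cons, hpq, ih]

theorem pv_foldB_congr (f g : Int → Int) :
    ∀ (ns : List Int) (d1 d2 : PySem.Dict Int (PySem.Set Int)),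
    (∀ a ∈ ns, ∀ b ∈ ns, (f a = f b ↔ g a = g b)) →
    List.Forall₂ (fun p q => p.2 = q.2 ∧ ∀ a ∈ ns, (f a = p.1 ↔ g a = q.1)) d1.items d2.items →
    (pvFoldB f ns d1).values = (pvFoldB g ns d2).values := by
  intro ns
  induction ns with
  | nil =>
    intro d1 d2 _ hF
    show d1.values = d2.values
    exact pv_snd_congr _ _ (hF.imp (fun p q h => h.1))
  | cons n t ih =>
    intro d1 d2 hfg hF
    have hlook : d1.get? (f n) = d2.get? (g n) :=
      pv_lookup_congr f g n d1.items d2.items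
        (hF.imp (fun p q h => ⟨h.1, h.2 n (by simp)⟩))
    simp only [pvFoldB, List.foldl_cons]
    set w1 := PySem.Set.add (d1.getD (f n) PySem.Set.empty) n with hw1
    set w2 := PySem.Set.add (d2.getD (g n) PySem.Set.empty) n with hw2
    have hw : w1 = w2 := by
      rw [hw1, hw2, PySem.Dict.getD_eq_get?_getD, PySem.Dict.getD_eq_get?_getD, hlook]
    cases hget : d1.get? (f n) with
    | some v =>
      have hget2 : d2.get? (g n) = some v := by rw [← hlook, hget]
      have hc1 : d1.contains (f n) = true := by
        rw [PySem.Dict.contains_eq_isSome_get?, hget]; rfl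
      have hc2 : d2.contains (g n) = true := by
        rw [PySem.Dict.contains_eq_isSome_get?, hget2]; rfl
      refine ih (d1.insert (f n) w1) (d2.insert (g n) w2)
        (fun a hat b hbt => hfg a (by simp [hat]) b (by simp [hbt])) ?_
      rw [PySem.Dict.items_insert_of_contains _ _ hc1, PySem.Dict.items_insert_of_contains _ _ hc2]
      rw [List.forall₂_map_left_iff, List.forall₂_map_right_iff]
      refine hF.imp ?_
      rintro p q ⟨hv, hk⟩
      by_cases hp : p.1 = f n
      · have hq : q.1 = g n := ((hk n (by simp)).1 hp.symm).symm
        rw [if_pos (by simp [hp]), if_pos (by simp [hq])]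
        refine ⟨hw, ?_⟩
        intro a hat
        simp only
        exact hfg a (by simp [hat]) n (by simp)
      · have hq : ¬ q.1 = g n := fun h => hp (((hk n (by simp)).2 h.symm).symm)
        rw [if_neg (by simp [hp]), if_neg (by simp [hq])]
        exact ⟨hv, fun a hat => hk a (by simp [hat])⟩
    | none =>
      have hget2 : d2.get? (g n) = none := by rw [← hlook, hget]
      have hc1 : d1.contains (f n) = false := by
        rw [PySem.Dict.contains_eq_isSome_get?, hget]; rfl
      have hc2 : d2.contains (g n) = false := by
        rw [PySem.Dict.contains_eq_isSome_get?, hget2]; rfl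
      refine ih (d1.insert (f n) w1) (d2.insert (g n) w2)
        (fun a hat b hbt => hfg a (by simp [hat]) b (by simp [hbt])) ?_
      rw [PySem.Dict.items_insert_of_not_contains _ _ hc1, PySem.Dict.items_insert_of_not_contains _ _ hc2]
      refine List.rel_append (hF.imp ?_) ?_
      · rintro p q ⟨hv, hk⟩
        exact ⟨hv, fun a hat => hk a (by simp [hat])⟩
      · refine List.forall₂_cons.mpr ⟨⟨hw, ?_⟩, List.Forall₂.nil⟩
        intro a hat
        simp only
        exact hfg a (by simp [hat]) n (by simp)
theorem pv_count : ∀ (ms : List (List (Int × Int))) (u : Int),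
    ms.foldl (fun u _ => u + 1) u = u + ms.length := by
  intro ms
  induction ms with
  | nil => intro u; simp
  | cons m t ih => intro u; simp [ih]; omega

-- ===== VERDICT (by name: the statement is the Claim_ definition above) =====
theorem compute_orbits_from_mappings_py_spec : Claim_equal_compute_orbits_from_mappings_py := by
  unfold Claim_equal_compute_orbits_from_mappings_py
  intro nodes mappings _ hPre
  unfold Spec_compute_orbits_from_mappings_py
  unfold compute_orbits_from_mappings_py compute_orbits_from_mappings_py_alt
  simp only []
  rw [PySem.List.foldl_prod_mk
    (f := fun p m => m.foldl (fun p sd => pvUnionA p sd.1 sd.2) p)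
    (g := fun (u : Int) (_ : List (Int × Int)) => u + 1)]
  set p0 := nodes.foldl (fun d n => d.insert n n) (PySem.Dict.empty : PySem.Dict Int Int) with hp0
  set pA := mappings.foldl (fun p m => m.foldl (fun p sd => pvUnionA p sd.1 sd.2) p) p0 with hpA
  set rep := mappings.foldl (fun r m => m.foldl pvStepB r) p0 with hrep
  have hInvA : pvInvA nodes mappings.flatten pA := by
    have := pv_loopA mappings [] p0 (pv_initA nodes) hPre
    simpa using this
  have hInvB : pvInvB nodes mappings.flatten rep := by
    have := pv_loopB mappings [] p0 (pv_initB nodes) hPre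
    simpa using this
  have hbucket := pv_bucketA (nodes := nodes) (es := mappings.flatten) pA nodes pA
    PySem.Dict.empty hInvA (fun y => rfl)
  rw [hbucket]
  have hBfold : (nodes.foldl (fun (d : PySem.Dict Int (PySem.Set Int)) n =>
      d.insert (pvGetB rep n) (PySem.Set.add (d.getD (pvGetB rep n) PySem.Set.empty) n))
      PySem.Dict.empty) = pvFoldB (fun y => pvGetB rep y) nodes PySem.Dict.empty := rfl
  rw [hBfold]
  simp only [Prod.mk.injEq]
  constructor
  · refine pv_foldB_congr _ _ nodes PySem.Dict.empty PySem.Dict.empty ?_ ?_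
    · intro a ha b hb
      exact (pvRoot_kernel hInvA ha hb).trans (hInvB.2.2.2 a b ha hb).symm
    · exact List.Forall₂.nil
  · rw [pv_count]
    simp
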